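-- pv_equiv track=rewrite | github.com/pypi-data/pypi-mirror-369 | packages/mapFolding/mapfolding-0.15.3-py3-none-any.whl/mapFolding/_oeisFormulas/A000682.py | initializeA000682
-- ===== SOURCE A (Python) =====
-- def initializeA000682(n: int) -> dict[int, int]:
-- 	curveLocationsMAXIMUM = 1 << (2 * n + 4)
--
-- 	curveSeed: int = 5 - (n & 0b1) * 4
-- 	listCurveLocations = [(curveSeed << 1) | curveSeed]
--
-- 	while listCurveLocations[-1] < curveLocationsMAXIMUM:
-- 		curveSeed = (curveSeed << 4) | 0b101
-- 		listCurveLocations.append((curveSeed << 1) | curveSeed)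
--
-- 	return dict.fromkeys(listCurveLocations, 1)
-- ===== SOURCE B (Python) =====
-- def initializeA000682(n: int) -> dict[int, int]:
-- 	# Closed form: the k-th curve location is (1 << b) * 16**k - 1 where b = 2 if n is odd else 4,
-- 	# and the loop stops after appending the first term >= 1 << (2*n + 4); so the number of extra
-- 	# terms is m = max(0, (e - b) // 4 + 1) with e = 2*n + 4.
-- 	e = 2 * n + 4
-- 	b = 2 if n & 1 else 4
-- 	m = max(0, (e - b) // 4 + 1)
-- 	base = 1 << b
-- 	return {(base << (4 * k)) - 1: 1 for k in range(m + 1)}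
-- ===== Notes on version B (the rewrite author's own statement) =====
-- stated objective: alternative
-- what changed: Replaces the shift-accumulate while-loop over a growing list by a closed form: the number of terms is computed directly from n (m = max(0, ((2n+4) - b)//4 + 1), b = 2 or 4 by parity) and the dict is built by a comprehension over range(m+1) with key (1<<b)*16^k - 1.
-- outside the precondition, e.g. on initializeA000682(-3): A raises ValueError, B returns {3: 1}
import Mathlib
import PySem

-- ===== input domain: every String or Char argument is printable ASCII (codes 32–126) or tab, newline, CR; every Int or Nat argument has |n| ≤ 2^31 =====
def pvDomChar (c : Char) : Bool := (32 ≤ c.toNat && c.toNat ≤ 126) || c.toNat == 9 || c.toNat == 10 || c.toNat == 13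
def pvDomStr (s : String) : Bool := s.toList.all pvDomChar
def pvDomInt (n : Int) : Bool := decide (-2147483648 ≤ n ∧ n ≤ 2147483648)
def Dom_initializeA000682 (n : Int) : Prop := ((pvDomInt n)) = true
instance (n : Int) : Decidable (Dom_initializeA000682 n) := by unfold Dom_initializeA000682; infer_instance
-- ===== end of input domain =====

-- B replaces A's shift-accumulate while-loop by a closed form for the number of terms and their
-- values (same exact dict; objective: alternative decomposition, no speed claim).

-- ===== PORT A =====
-- Invariant carried by the loop: the current seed s satisfies 3*s+1 = 2^(b+4k) for b ∈ {2,4}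
-- (true of the initial seeds 1 and 5 and preserved by seed = (seed << 4) | 0b101).
-- It is used only to justify termination of Python's while-loop.
def seedInv (s : Int) : Prop := ∃ b k : Nat, (b = 2 ∨ b = 4) ∧ 3 * s + 1 = (2 : Int) ^ (b + 4 * k)

theorem pow4mod3 (j : Nat) : 2 ^ (2 * j) % 3 = 1 := by
  induction j with
  | zero => decide
  | succ j ih =>
    rw [show 2 * (j + 1) = 2 * j + 2 by ring, pow_add]
    omega

theorem lorSplit16 (a b' r1 r2 : Nat) (h1 : r1 < 16) (h2 : r2 < 16) :
    (16 * a + r1) ||| (16 * b' + r2) = 16 * (a ||| b') + (r1 ||| r2) := by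
  have hp : (2:Nat) ^ 4 = 16 := by norm_num
  have e1 : 16 * a + r1 = a <<< 4 ||| r1 := by
    rw [← Nat.shiftLeft_add_eq_or_of_lt (by omega : r1 < 2 ^ 4), Nat.shiftLeft_eq]
    omega
  have e2 : 16 * b' + r2 = b' <<< 4 ||| r2 := by
    rw [← Nat.shiftLeft_add_eq_or_of_lt (by omega : r2 < 2 ^ 4), Nat.shiftLeft_eq]
    omega
  have e3 : 16 * (a ||| b') + (r1 ||| r2) = (a ||| b') <<< 4 ||| (r1 ||| r2) := by
    rw [← Nat.shiftLeft_add_eq_or_of_lt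
          (Nat.or_lt_two_pow (by omega : r1 < 2 ^ 4) (by omega : r2 < 2 ^ 4)),
        Nat.shiftLeft_eq]
    omega
  rw [e1, e2, e3, Nat.shiftLeft_or_distrib]
  rw [Nat.or_assoc, ← Nat.or_assoc r1, Nat.or_comm r1 (b' <<< 4), Nat.or_assoc, ← Nat.or_assoc]

theorem natLor3 (k : Nat) : ∀ (b s : Nat), (b = 2 ∨ b = 4) → 3 * s + 1 = 2 ^ (b + 4 * k) →
    (2 * s) ||| s = 3 * s := by
  induction k with
  | zero =>
    rintro b s (rfl | rfl) hs
    · have h4 : (2:Nat) ^ (2 + 4 * 0) = 4 := by norm_num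
      have : s = 1 := by omega
      subst this; decide
    · have h16 : (2:Nat) ^ (4 + 4 * 0) = 16 := by norm_num
      have : s = 5 := by omega
      subst this; decide
  | succ k ih =>
    intro b s hb hs
    have ht3 : 2 ^ (b + 4 * k) % 3 = 1 := by
      obtain ⟨j, hj⟩ : ∃ j, b + 4 * k = 2 * j := by
        rcases hb with rfl | rfl
        · exact ⟨1 + 2 * k, by ring⟩
        · exact ⟨2 + 2 * k, by ring⟩
      rw [hj]; exact pow4mod3 j
    have hs16 : 3 * s + 1 = 16 * 2 ^ (b + 4 * k) := by
      rw [hs, show b + 4 * (k + 1) = (b + 4 * k) + 4 by ring, pow_add]; ring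
    obtain ⟨sp, hsp⟩ : ∃ sp, 2 ^ (b + 4 * k) = 3 * sp + 1 := ⟨2 ^ (b + 4 * k) / 3, by omega⟩
    have hdec : s = 16 * sp + 5 := by omega
    have ihsp : (2 * sp) ||| sp = 3 * sp := ih b sp hb (by omega)
    calc (2 * s) ||| s = (16 * (2 * sp) + 10) ||| (16 * sp + 5) := by rw [hdec]; ring_nf
      _ = 16 * ((2 * sp) ||| sp) + (10 ||| 5) := lorSplit16 _ _ _ _ (by norm_num) (by norm_num)
      _ = 3 * s := by rw [ihsp, hdec, show (10 ||| 5 : Nat) = 15 from rfl]; ring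

theorem seed_pos {s : Int} (h : seedInv s) : 1 ≤ s := by
  obtain ⟨b, k, hb, hs⟩ := h
  have h4 : (4 : Nat) ≤ 2 ^ (b + 4 * k) := by
    calc (4:Nat) = 2 ^ 2 := by norm_num
    _ ≤ 2 ^ (b + 4 * k) := Nat.pow_le_pow_right (by norm_num) (by omega)
  have hc : ((2:Int)) ^ (b + 4 * k) = ((2 ^ (b + 4 * k) : Nat) : Int) := by push_cast; ring
  rw [hc] at hs
  omega

theorem val_eq {s : Int} (h : seedInv s) : PySem.Int.bor (s <<< (1:Nat)) s = 3 * s := by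
  obtain ⟨b, k, hb, hs⟩ := h
  have hpos : 1 ≤ s := seed_pos ⟨b, k, hb, hs⟩
  have h2 : s <<< (1:Nat) = 2 * s := by rw [Int.shiftLeft_eq]; ring
  rw [h2, PySem.Int.bor_of_nonneg (by omega) (by omega)]
  have hnat : 3 * s.toNat + 1 = 2 ^ (b + 4 * k) := by
    have hc : ((2:Int)) ^ (b + 4 * k) = ((2 ^ (b + 4 * k) : Nat) : Int) := by push_cast; ring
    rw [hc] at hs; omega
  have ht : (2 * s).toNat = 2 * s.toNat := by omega
  rw [ht, natLor3 k b s.toNat hb hnat]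
  omega

theorem step_eq {s : Int} (h : 0 ≤ s) : PySem.Int.bor (s <<< (4:Nat)) 5 = 16 * s + 5 := by
  have h2 : s <<< (4:Nat) = 16 * s := by rw [Int.shiftLeft_eq]; norm_num; ring
  rw [h2, PySem.Int.bor_of_nonneg (by omega) (by omega)]
  have ht : (16 * s).toNat = 16 * s.toNat := by omega
  have h5 : (5:Int).toNat = 5 := rfl
  rw [ht, h5]
  have h3 : s.toNat * 2 ^ 4 + 5 = s.toNat * 2 ^ 4 ||| 5 := by
    have h' := Nat.shiftLeft_add_eq_or_of_lt (a := s.toNat) (b := 5) (i := 4) (by norm_num)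
    rwa [Nat.shiftLeft_eq] at h'
  have h4 : 16 * s.toNat ||| 5 = 16 * s.toNat + 5 := by
    rw [show 16 * s.toNat = s.toNat * 2 ^ 4 by ring, ← h3]
  rw [h4]; omega

theorem seedInv_step {s : Int} (h : seedInv s) : seedInv (PySem.Int.bor (s <<< (4:Nat)) 5) := by
  obtain ⟨b, k, hb, hs⟩ := h
  have hpos : 1 ≤ s := seed_pos ⟨b, k, hb, hs⟩
  rw [step_eq (by omega)]
  exact ⟨b, k + 1, hb, by rw [show b + 4 * (k + 1) = (b + 4 * k) + 4 by ring, pow_add]; push_cast; linarith [hs]⟩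

theorem seedInv_init (n : Int) : seedInv (5 - PySem.Int.band n 1 * 4) := by
  rw [PySem.Int.band_one]
  have h0 := PySem.Int.mod_nonneg n (b := 2) (by norm_num)
  have h1 := PySem.Int.mod_lt n (b := 2) (by norm_num)
  have hc : PySem.Int.mod n 2 = 0 ∨ PySem.Int.mod n 2 = 1 := by omega
  rcases hc with h | h <;> rw [h]
  · exact ⟨4, 0, Or.inr rfl, by norm_num⟩
  · exact ⟨2, 0, Or.inl rfl, by norm_num⟩

-- the while-loop: while list[-1] < MAX: seed = (seed << 4) | 0b101; list.append((seed << 1) | seed)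
-- (the loop guard reads the last appended value, which is (s <<< (1:Nat)) ||| s for the current seed)
def aLoop (MAX s : Int) (acc : List Int) (h : seedInv s) : List Int :=
  if PySem.Int.bor (s <<< (1:Nat)) s < MAX then
    aLoop MAX (PySem.Int.bor (s <<< (4:Nat)) 5)
      (acc ++ [PySem.Int.bor ((PySem.Int.bor (s <<< (4:Nat)) 5) <<< (1:Nat)) (PySem.Int.bor (s <<< (4:Nat)) 5)])
      (seedInv_step h)
  else acc
termination_by (MAX - PySem.Int.bor (s <<< (1:Nat)) s).toNat
decreasing_by
  have hp := seed_pos h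
  rw [val_eq h, val_eq (seedInv_step h), step_eq (by omega)] at *
  omega

def initializeA000682 (n : Int) : List (Int × Int) :=
  -- 1 << (2*n + 4): exact for 2*n+4 ≥ 0 (Pre_); Python raises ValueError on a negative shift count
  let curveLocationsMAXIMUM : Int := 1 <<< (2 * n + 4).toNat
  let curveSeed : Int := 5 - PySem.Int.band n 1 * 4
  let lst := aLoop curveLocationsMAXIMUM curveSeed
    [PySem.Int.bor (curveSeed <<< (1:Nat)) curveSeed] (seedInv_init n)
  -- dict.fromkeys(listCurveLocations, 1)
  (lst.foldl (fun d v => PySem.Dict.insert d v 1) PySem.Dict.empty).items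

-- ===== PORT B =====
def initializeA000682_alt (n : Int) : List (Int × Int) :=
  let e : Int := 2 * n + 4
  let b : Int := if PySem.Int.band n 1 ≠ 0 then 2 else 4
  let m : Int := max 0 (PySem.Int.floordiv (e - b) 4 + 1)
  let base : Int := 1 <<< b.toNat
  -- {(base << (4*k)) - 1: 1 for k in range(m + 1)}
  ((PySem.List.pyRange 0 (m + 1) 1).foldl
    (fun d k => PySem.Dict.insert d (base <<< (4 * k).toNat - 1) 1) PySem.Dict.empty).items

-- ===== PRECONDITION & SPEC =====
-- Pre_ excludes exactly n < -2, where Python's 1 << (2*n+4) raises ValueError (negative shift count).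
def Pre_initializeA000682 (n : Int) : Prop := -2 ≤ n
instance (n : Int) : Decidable (Pre_initializeA000682 n) := by unfold Pre_initializeA000682; infer_instance
def pvWitness_initializeA000682 : Int := 4

def Spec_initializeA000682 (n : Int) (out : List (Int × Int)) : Prop := out = initializeA000682_alt n
instance (n : Int) (out : List (Int × Int)) : Decidable (Spec_initializeA000682 n out) := by unfold Spec_initializeA000682; infer_instance

-- ===== CLAIM (what is proved, stated in full; the proofs are below) =====
def Claim_equal_initializeA000682 : Prop := ∀ (n : Int), Dom_initializeA000682 n → Pre_initializeA000682 n → Spec_initializeA000682 n (initializeA000682 n)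

-- ===== LEMMAS AND PROOFS =====

-- the seed after j loop iterations
def iterS (s : Int) : Nat → Int
  | 0 => s
  | j + 1 => 16 * iterS s j + 5

theorem iter_shift (s : Int) : ∀ j, iterS (16 * s + 5) j = iterS s (j + 1) := by
  intro j
  induction j with
  | zero => rfl
  | succ j ih => simp [iterS, ih]

theorem iter_closed (s : Int) : ∀ j, 3 * iterS s j + 1 = (3 * s + 1) * 16 ^ j := by
  intro j
  induction j with
  | zero => simp [iterS]
  | succ j ih => rw [iterS, pow_succ]; linarith [ih]

theorem iter_pow (b : Nat) (s : Int) (hs : 3 * s + 1 = (2:Int) ^ b) (j : Nat) :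
    3 * iterS s j = 2 ^ (b + 4 * j) - 1 := by
  have := iter_closed s j
  rw [hs] at this
  have h16 : ((16:Int)) ^ j = 2 ^ (4 * j) := by
    rw [show (16:Int) = 2 ^ 4 by norm_num, ← pow_mul]
  rw [h16, ← pow_add] at this
  omega

theorem aLoop_congr (MAX : Int) {s s' : Int} (hss : s = s') (acc : List Int)
    (h : seedInv s) (h' : seedInv s') : aLoop MAX s acc h = aLoop MAX s' acc h' := by
  subst hss; rfl

theorem aLoop_eq (m : Nat) : ∀ (MAX s : Int) (acc : List Int) (h : seedInv s),
    (∀ j : Nat, j < m → 3 * iterS s j < MAX) → MAX ≤ 3 * iterS s m →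
    aLoop MAX s acc h = acc ++ (List.range m).map (fun j => 3 * iterS s (j + 1)) := by
  induction m with
  | zero =>
    intro MAX s acc h _ hge
    rw [aLoop, val_eq h, if_neg (by simp [iterS] at hge; omega)]
    simp
  | succ m ih =>
    intro MAX s acc h hlt hge
    rw [aLoop, val_eq h, if_pos (by simpa [iterS] using hlt 0 (Nat.succ_pos m))]
    have hstep : PySem.Int.bor (s <<< (4:Nat)) 5 = 16 * s + 5 := step_eq (by linarith [seed_pos h])
    have hval : PySem.Int.bor ((PySem.Int.bor (s <<< (4:Nat)) 5) <<< (1:Nat)) (PySem.Int.bor (s <<< (4:Nat)) 5)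
        = 3 * (16 * s + 5) := by
      rw [val_eq (seedInv_step h), hstep]
    have hinv' : seedInv (16 * s + 5) := hstep ▸ seedInv_step h
    have hrw : aLoop MAX (PySem.Int.bor (s <<< (4:Nat)) 5)
        (acc ++ [PySem.Int.bor ((PySem.Int.bor (s <<< (4:Nat)) 5) <<< (1:Nat)) (PySem.Int.bor (s <<< (4:Nat)) 5)])
        (seedInv_step h)
        = aLoop MAX (16 * s + 5) (acc ++ [3 * (16 * s + 5)]) hinv' := by
      rw [hval]
      exact aLoop_congr MAX hstep _ _ _
    rw [hrw, ih MAX (16 * s + 5) _ hinv'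
        (fun j hj => by rw [iter_shift]; exact hlt (j+1) (by omega))
        (by rw [iter_shift]; exact hge)]
    rw [List.range_succ_eq_map]
    simp [List.map_map, Function.comp, iter_shift, iterS]

-- number of loop iterations for exponent e and parity exponent b
def Mcount (e b : Nat) : Nat := if e < b then 0 else (e - b) / 4 + 1

theorem listsEq (e b : Nat) (s0 : Int) (hs : 3 * s0 + 1 = (2:Int) ^ b)
    (hinv : seedInv s0) :
    aLoop ((2:Int) ^ e) s0 [3 * s0] hinv
      = (List.range (Mcount e b + 1)).map (fun j => (2:Int) ^ (b + 4 * j) - 1) := by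
  have hpow : ∀ j : Nat, 3 * iterS s0 j = 2 ^ (b + 4 * j) - 1 := iter_pow b s0 hs
  have hmono : ∀ x y : Nat, x ≤ y → (2:Int) ^ x ≤ 2 ^ y := fun x y hxy =>
    pow_le_pow_right₀ (by norm_num) hxy
  have hlt : ∀ j : Nat, j < Mcount e b → 3 * iterS s0 j < 2 ^ e := by
    intro j hj
    rw [hpow j]
    have hble : b + 4 * j ≤ e := by
      unfold Mcount at hj
      split at hj
      · omega
      · have h4 : 4 * ((e - b) / 4) ≤ e - b := Nat.mul_div_le _ 4 |>.trans (le_refl _) |>.trans (le_refl _)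
        omega
    have := hmono _ _ hble
    have hp : (0:Int) < 2 ^ (b + 4 * j) := by positivity
    omega
  have hge : (2:Int) ^ e ≤ 3 * iterS s0 (Mcount e b) := by
    rw [hpow]
    have hble : e + 1 ≤ b + 4 * Mcount e b := by
      unfold Mcount
      split
      · omega
      · have h4 : e - b < 4 * ((e - b) / 4 + 1) := Nat.lt_mul_div_succ _ (by norm_num)
        omega
    have h1 := hmono _ _ hble
    have h2 : (2:Int) ^ (e + 1) = 2 * 2 ^ e := by rw [pow_succ]; ring
    have hp : (0:Int) < 2 ^ e := by positivity
    omega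
  rw [aLoop_eq (Mcount e b) _ s0 _ hinv hlt hge]
  rw [List.range_succ_eq_map]
  simp only [List.map_cons, List.map_map, List.cons_append, List.nil_append,
    List.map_cons]
  congr 1
  · rw [show 3 * s0 = 3 * iterS s0 0 from rfl, hpow 0]
  · apply List.map_congr_left
    intro j _
    simp only [Function.comp]
    rw [hpow (j + 1)]

theorem countEq (e : Nat) (b : Int) (hb : b = 2 ∨ b = 4) :
    (max 0 (PySem.Int.floordiv ((e:Int) - b) 4 + 1) + 1).toNat = Mcount e b.toNat + 1 := by
  rw [PySem.Int.floordiv_eq_ediv_of_pos (by norm_num)]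
  unfold Mcount
  rcases hb with rfl | rfl <;> [skip; skip] <;>
  · split <;> omega

theorem sideEq (e : Nat) (bI s0 : Int) (hb : bI = 2 ∨ bI = 4)
    (hs : 3 * s0 + 1 = (2:Int) ^ bI.toNat) (hinv : seedInv s0) :
    (aLoop ((2:Int) ^ e) s0 [3 * s0] hinv).foldl
        (fun d v => PySem.Dict.insert d v (1:Int)) PySem.Dict.empty
      = (PySem.List.pyRange 0 (max 0 (PySem.Int.floordiv ((e:Int) - bI) 4 + 1) + 1) 1).foldl
          (fun d k => PySem.Dict.insert d (((1 <<< bI.toNat : Nat) : Int) <<< (4 * k).toNat - 1) (1:Int))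
          PySem.Dict.empty := by
  rw [listsEq e bI.toNat s0 hs hinv]
  rw [PySem.List.pyRange_one]
  rw [List.foldl_map, List.foldl_map]
  have hN : ((max 0 (PySem.Int.floordiv ((e:Int) - bI) 4 + 1) + 1) - 0).toNat
      = Mcount e bI.toNat + 1 := by
    rw [sub_zero]; exact countEq e bI hb
  rw [hN]
  congr 1
  funext d j
  congr 1
  have h1 : (4 * ((0:Int) + (j:Int))).toNat = 4 * j := by omega
  have h2 : ((1 <<< bI.toNat : Nat) : Int) = 2 ^ bI.toNat := by
    rw [Nat.shiftLeft_eq, one_mul]; push_cast; ring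
  rw [h1, Int.shiftLeft_natCast_right, Int.shiftLeft_eq, h2, ← pow_add]

-- ===== VERDICT (by name: the statement is the Claim_ definition above) =====
theorem initializeA000682_spec : Claim_equal_initializeA000682 := by
  intro n _ hpre
  unfold Spec_initializeA000682
  unfold Pre_initializeA000682 at hpre
  obtain ⟨e, he⟩ : ∃ e : Nat, 2 * n + 4 = (e : Int) := ⟨(2 * n + 4).toNat, by omega⟩
  have hMAX : ((1 <<< (2 * n + 4).toNat : Nat) : Int) = 2 ^ e := by
    rw [show (2 * n + 4).toNat = e by omega, Nat.shiftLeft_eq, one_mul]; push_cast; ring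
  have h0 := PySem.Int.mod_nonneg n (b := 2) (by norm_num)
  have h1 := PySem.Int.mod_lt n (b := 2) (by norm_num)
  rcases (by omega : PySem.Int.mod n 2 = 0 ∨ PySem.Int.mod n 2 = 1) with hm | hm <;>
    simp only [initializeA000682, initializeA000682_alt, PySem.Int.band_one, hm] <;>
    rw [hMAX, he]
  · exact congrArg PySem.Dict.items
      (sideEq e 4 5 (Or.inr rfl) (by decide) ⟨4, 0, Or.inr rfl, by decide⟩)
  · exact congrArg PySem.Dict.items
      (sideEq e 2 1 (Or.inl rfl) (by decide) ⟨2, 0, Or.inl rfl, by decide⟩)
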